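-- pv_equiv track=rewrite | github.com/makikeo/eBCSgen | Core/Rule.py | find_all_matches
-- ===== SOURCE A (Python) =====
-- from copy import copy, deepcopy
--
-- def find_all_matches(matching_map, state):
--     choices = []
--     if len(matching_map) == 0:
--         return [choices]
--     for match in matching_map[0]:
--         if match in state and state[match] > 0:
--             state[match] -= 1
--             for branch in find_all_matches(matching_map[1:], deepcopy(state)):
--                 choices.append([match] + branch)
--     return choices
-- ===== SOURCE B (Python) =====
-- def find_all_matches(matching_map, state):
--     # Backtracking over an index: decrement in place, each level restores its
--     # own decrements on return (no per-node deepcopy, no slicing).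
--     # Return-value equivalent to A; unlike A, the caller's `state` is restored.
--     result = []
--     prefix = []
--
--     def rec(i):
--         if i >= len(matching_map):
--             result.append(prefix.copy())
--             return
--         touched = []
--         for m in matching_map[i]:
--             if state.get(m, 0) > 0:
--                 state[m] -= 1
--                 touched.append(m)
--                 prefix.append(m)
--                 rec(i + 1)
--                 prefix.pop()
--         for m in reversed(touched):
--             state[m] += 1
--
--     rec(0)
--     return result
-- ===== Notes on version B (the rewrite author's own statement) =====
-- stated objective: faster
-- what changed: Replaces A's per-node deepcopy of the state and matching_map[1:] slice recursion with in-place backtracking over an index: each level decrements counts in place, records the touched keys, and restores them in reverse on return, building results via a shared growing/shrinking prefix.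
import Mathlib
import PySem

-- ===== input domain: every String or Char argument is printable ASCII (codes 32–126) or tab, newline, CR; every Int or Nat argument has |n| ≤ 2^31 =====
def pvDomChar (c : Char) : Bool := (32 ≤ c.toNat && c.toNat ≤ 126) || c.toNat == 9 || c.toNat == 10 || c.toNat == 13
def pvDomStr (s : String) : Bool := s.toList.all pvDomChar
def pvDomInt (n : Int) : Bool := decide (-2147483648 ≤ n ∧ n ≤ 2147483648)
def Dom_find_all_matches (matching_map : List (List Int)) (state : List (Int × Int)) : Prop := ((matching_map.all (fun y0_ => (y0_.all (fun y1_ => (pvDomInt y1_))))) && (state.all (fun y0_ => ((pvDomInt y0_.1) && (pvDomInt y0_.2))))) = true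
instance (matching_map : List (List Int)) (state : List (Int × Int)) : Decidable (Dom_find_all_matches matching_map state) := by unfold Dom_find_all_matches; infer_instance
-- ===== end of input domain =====

-- B replaces A's per-node deepcopy + slice recursion with in-place backtracking over an
-- index (each level restores its own decrements), for an asymptotic speed-up; equivalence
-- is about the RETURN value only (A leaves the caller's first-level decrements in `state`,
-- B restores them).

-- ===== PORT A =====
-- A's recursion: for each match in row 0 with a positive count, decrement (the decrement
-- persists across the loop), recurse on the slice matching_map[1:] with a copy of state.
mutual
def famA : List (List Int) → PySem.Dict Int Int → List (List Int)
  | [], _ => [[]]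
  | m0 :: rest, st => (famALoop rest m0 st []).2
def famALoop : List (List Int) → List Int → PySem.Dict Int Int → List (List Int) → PySem.Dict Int Int × List (List Int)
  | _, [], st, ch => (st, ch)
  | rest, m :: ms, st, ch =>
    match st.get? m with                 -- `match in state and state[match] > 0`
    | some v =>
      if 0 < v then
        let st' := st.insert m (v - 1)   -- state[match] -= 1
        famALoop rest ms st' (ch ++ (famA rest st').map (fun b => m :: b))
      else famALoop rest ms st ch
    | none => famALoop rest ms st ch
end

def find_all_matches (matching_map : List (List Int)) (state : List (Int × Int)) : List (List Int) :=
  famA matching_map (PySem.Dict.ofList state)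

-- ===== PORT B =====
-- B's recursion (Source B): pass an index, decrement in place, collect `touched` and restore
-- it in reverse on return; `prefix` grows and shrinks along the DFS.  The mutable state /
-- prefix / result of the Python are threaded explicitly.
mutual
def famB (mm : List (List Int)) (i : Nat) (st : PySem.Dict Int Int) (pre : List Int) (res : List (List Int)) : PySem.Dict Int Int × List (List Int) :=
  if _h : mm.length <= i then (st, res ++ [pre])      -- i >= len(matching_map): emit prefix
  else
    let r := famBLoop mm i (by omega) (mm.getD i []) st [] pre res   -- for m in matching_map[i]
    -- for m in reversed(touched): state[m] += 1
    (r.2.1.reverse.foldl (fun s m => s.insert m (s.getD m 0 + 1)) r.1, r.2.2)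
termination_by (mm.length - i, (mm.getD i []).length + 1)
decreasing_by exact Prod.Lex.right _ (by omega)

def famBLoop (mm : List (List Int)) (i : Nat) (hi : i < mm.length) (ms : List Int) (st : PySem.Dict Int Int) (t pre : List Int) (res : List (List Int)) : PySem.Dict Int Int × List Int × List (List Int) :=
  match ms with
  | [] => (st, t, res)
  | m :: ms' =>
    if 0 < st.getD m 0 then                          -- state.get(m, 0) > 0
      let st' := st.insert m (st.getD m 0 - 1)       -- state[m] -= 1
      let r := famB mm (i + 1) st' (pre ++ [m]) res  -- prefix.append(m); rec(i+1); prefix.pop()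
      famBLoop mm i hi ms' r.1 (t ++ [m]) pre r.2
    else famBLoop mm i hi ms' st t pre res
termination_by (mm.length - i, ms.length)
decreasing_by
  · exact Prod.Lex.left _ _ (by omega)
  · exact Prod.Lex.right _ (by simp)
  · exact Prod.Lex.right _ (by simp)
end

def find_all_matches_alt (matching_map : List (List Int)) (state : List (Int × Int)) : List (List Int) :=
  (famB matching_map 0 (PySem.Dict.ofList state) [] []).2

-- ===== PRECONDITION & SPEC =====
def Spec_find_all_matches (matching_map : List (List Int)) (state : List (Int × Int)) (out : List (List Int)) : Prop := out = find_all_matches_alt matching_map state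
instance (matching_map : List (List Int)) (state : List (Int × Int)) (out : List (List Int)) : Decidable (Spec_find_all_matches matching_map state out) := by unfold Spec_find_all_matches; infer_instance

-- ===== CLAIM (what is proved, stated in full; the proofs are below) =====
def Claim_equal_find_all_matches : Prop := ∀ (matching_map : List (List Int)) (state : List (Int × Int)), Dom_find_all_matches matching_map state → Spec_find_all_matches matching_map state (find_all_matches matching_map state)

-- ===== LEMMAS AND PROOFS =====

-- Proof-side skeleton of the state threading shared by both loops: the list of matches
-- actually taken in one row (A's loop decrements exactly these; B's `touched`) and the
-- state after the row.
def decs : List Int → PySem.Dict Int Int → List Int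
  | [], _ => []
  | m :: ms, st =>
    match st.get? m with
    | some v => if 0 < v then m :: decs ms (st.insert m (v - 1)) else decs ms st
    | none => decs ms st

def applyDecs : List Int → PySem.Dict Int Int → PySem.Dict Int Int
  | [], st => st
  | m :: ms, st =>
    match st.get? m with
    | some v => if 0 < v then applyDecs ms (st.insert m (v - 1)) else applyDecs ms st
    | none => applyDecs ms st

lemma insert_self (d : PySem.Dict Int Int) (k v : Int) (hn : d.keys.Nodup)
    (h : d.get? k = some v) : d.insert k v = d := by
  apply PySem.Dict.ext
  have hc : d.contains k = true := by
    rw [PySem.Dict.contains_eq_isSome_get?, h]; rfl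
  rw [PySem.Dict.items_insert_of_contains _ v hc]
  have : ∀ p ∈ d.items, (if p.1 == k then (k, v) else p) = p := by
    intro p hp
    obtain ⟨a, b⟩ := p
    by_cases hpk : a = k
    · subst hpk
      have hg : d.get? a = some b := PySem.Dict.get?_of_mem_items _ hp hn
      rw [h] at hg
      simp [Option.some_inj.mp hg]
    · simp [hpk]
  calc d.items.map (fun p => if p.1 == k then (k, v) else p)
      = d.items.map id := List.map_congr_left this
    _ = d.items := List.map_id _

-- B's end-of-level restore undoes exactly the row's decrements.
lemma restore_decs (ms : List Int) (st : PySem.Dict Int Int) (hn : st.keys.Nodup) :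
    (decs ms st).reverse.foldl (fun s m => s.insert m (s.getD m 0 + 1)) (applyDecs ms st) = st := by
  induction ms generalizing st with
  | nil => simp [decs, applyDecs]
  | cons m ms ih =>
    simp only [decs, applyDecs]
    cases h : st.get? m with
    | none => exact ih st hn
    | some v =>
      by_cases hv : 0 < v
      · simp only [hv, if_true, List.reverse_cons, List.foldl_append, List.foldl_cons, List.foldl_nil]
        rw [ih _ (PySem.Dict.nodup_keys_insert _ _ _ hn)]
        rw [PySem.Dict.getD_insert_self]
        have : v - 1 + 1 = v := by omega
        rw [this, PySem.Dict.insert_insert_self, insert_self st m v hn h]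
      · simp only [hv, if_false]; exact ih st hn

-- A's choices accumulator appends.
lemma famALoop_snd (rest : List (List Int)) (ms : List Int) (st : PySem.Dict Int Int)
    (ch : List (List Int)) : (famALoop rest ms st ch).2 = ch ++ (famALoop rest ms st []).2 := by
  induction ms generalizing st ch with
  | nil => simp [famALoop]
  | cons m ms ih =>
    simp only [famALoop]
    cases h : st.get? m with
    | none => exact ih st ch
    | some v =>
      by_cases hv : 0 < v
      · simp only [hv, if_true]
        rw [ih _ (ch ++ _), ih _ ([] ++ _)]
        simp
      · simp only [hv, if_false]; exact ih st ch

-- Main correspondence: B's recursion at index i computes A's value on the suffix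
-- mm.drop i, mapped under the current prefix, appended to the accumulated results,
-- and returns the state it was given.
lemma famB_eq (k : Nat) : ∀ (mm : List (List Int)) (i : Nat) (st : PySem.Dict Int Int)
    (pre : List Int) (res : List (List Int)), mm.length - i ≤ k → st.keys.Nodup →
    famB mm i st pre res = (st, res ++ (famA (mm.drop i) st).map (fun b => pre ++ b)) := by
  induction k with
  | zero =>
    intro mm i st pre res hk _
    have hle : mm.length ≤ i := by omega
    rw [famB]
    simp [hle, List.drop_eq_nil_of_le hle, famA]
  | succ k ih =>
    intro mm i st pre res hk hn
    by_cases hle : mm.length ≤ i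
    · rw [famB]; simp [hle, List.drop_eq_nil_of_le hle, famA]
    · have hi : i < mm.length := by omega
      have loop : ∀ (ms : List Int) (st : PySem.Dict Int Int) (t pre : List Int)
          (res : List (List Int)), st.keys.Nodup →
          famBLoop mm i hi ms st t pre res =
            (applyDecs ms st, t ++ decs ms st,
             res ++ ((famALoop (mm.drop (i + 1)) ms st []).2).map (fun b => pre ++ b)) := by
        intro ms
        induction ms with
        | nil => intro st t pre res _; simp [famBLoop, applyDecs, decs, famALoop]
        | cons m ms ihl =>
          intro st t pre res hns
          rw [famBLoop]
          simp only [applyDecs, decs]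
          cases h : st.get? m with
          | none =>
            have hg : st.getD m 0 = 0 := PySem.Dict.getD_of_get?_eq_none st 0 h
            simp only [famALoop, h, hg]
            have : ¬ (0 : Int) < 0 := by omega
            simp only [this, if_false]
            exact ihl st t pre res hns
          | some v =>
            have hg : st.getD m 0 = v := PySem.Dict.getD_of_get?_eq_some st 0 h
            by_cases hv : 0 < v
            · simp only [famALoop, h, hg, hv, if_true]
              have hrec := ih mm (i + 1) (st.insert m (v - 1)) (pre ++ [m]) res
                (by omega) (PySem.Dict.nodup_keys_insert _ _ _ hns)
              rw [hrec]
              rw [ihl _ _ _ _ (PySem.Dict.nodup_keys_insert _ _ _ hns)]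
              simp only [List.nil_append]
              rw [famALoop_snd (mm.drop (i + 1)) ms (st.insert m (v - 1))
                (List.map (fun b => m :: b) (famA (mm.drop (i + 1)) (st.insert m (v - 1))))]
              refine Prod.ext (by simp) (Prod.ext (by simp) ?_)
              simp only [List.map_append, List.map_map, List.append_assoc]
              congr 2
            · simp only [famALoop, h, hg, hv, if_false]
              exact ihl st t pre res hns
      rw [famB]
      simp only [hle, dite_false]
      rw [loop _ _ _ _ _ hn]
      simp only [List.nil_append]
      have hdrop : mm.drop i = mm[i] :: mm.drop (i + 1) := List.drop_eq_getElem_cons hi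
      have hrow : mm.getD i [] = mm[i] := List.getD_eq_getElem mm [] hi
      refine Prod.ext ?_ ?_
      · rw [hrow]
        exact restore_decs (mm[i]) st hn
      · rw [hrow, hdrop]
        simp only [famA]

-- ===== VERDICT (by name: the statement is the Claim_ definition above) =====
theorem find_all_matches_spec : Claim_equal_find_all_matches := by
  intro mm state _
  unfold Spec_find_all_matches find_all_matches find_all_matches_alt
  rw [famB_eq (mm.length) mm 0 (PySem.Dict.ofList state) [] [] (by omega)
      (PySem.Dict.nodup_keys_ofList state)]
  simp
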